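-- pv_equiv track=rewrite | github.com/JuanBap/Taller3ADA | main.py | max_variacion_constante_bottom_up
-- ===== SOURCE A (Python) =====
-- def max_variacion_constante_bottom_up(P):
--     """
--     Encuentra el máximo número de periodos contiguos durante los cuales
--     la acción incrementó o decrementó exactamente en el mismo valor.
--     Versión Iterativa (Bottom-Up) con Tabulación.
--     """
--     m = len(P)
--     if m < 2:
--         return m
--
--     # Crear la memoria. Tamaño m+1 para manejar fácilmente el caso base M[m]
--     # Inicializar con 0.
--     M = [0] * (m + 1)
--
--     # Establecer casos base explícitamente en M
--     # M[m] ya es 0 (representa longitud para subproblema vacío)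
--     if m > 0:
--         M[m-1] = 1 # La máxima longitud en el último elemento es 1
--
--     # Llenar la tabla M desde el final hacia el principio
--     # k va desde m-2 hasta 0
--     for k in range(m - 2, -1, -1):
--         # Calcular la longitud de la racha que comienza en k
--         # Siempre hay al menos P[k] y P[k+1] porque k <= m-2
--         longitud_actual = 2 # Al menos P[k] y P[k+1]
--         diferencia = P[k+1] - P[k]
--         for j in range(k + 2, m):
--             if P[j] - P[j-1] == diferencia:
--                 longitud_actual += 1
--             else:
--                 break
--
--         # La solución en k depende de la racha que empieza en k
--         # y la solución ya calculada para k+1 (almacenada en M[k+1])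
--         # M[k+1] contiene la máxima longitud encontrada a partir del índice k+1
--         M[k] = max(longitud_actual, M[k+1])
--
--     # El resultado final está en M[0], que considera todo el arreglo P[0:]
--     return M[0]
-- ===== SOURCE B (Python) =====
-- def max_variacion_constante_bottom_up(P):
--     m = len(P)
--     if m < 2:
--         return m
--     best = 2
--     cur = 2
--     diff = P[1] - P[0]
--     for j in range(2, m):
--         d = P[j] - P[j-1]
--         if d == diff:
--             cur += 1
--         else:
--             diff = d
--             cur = 2
--         if cur > best:
--             best = cur
--     return best
-- ===== Notes on version B (the rewrite author's own statement) =====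
-- stated objective: faster
-- what changed: Replaced the bottom-up table with an inner rescan of the run starting at every index by a single forward pass that tracks the current equal-difference run length and the running maximum.
import Mathlib
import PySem

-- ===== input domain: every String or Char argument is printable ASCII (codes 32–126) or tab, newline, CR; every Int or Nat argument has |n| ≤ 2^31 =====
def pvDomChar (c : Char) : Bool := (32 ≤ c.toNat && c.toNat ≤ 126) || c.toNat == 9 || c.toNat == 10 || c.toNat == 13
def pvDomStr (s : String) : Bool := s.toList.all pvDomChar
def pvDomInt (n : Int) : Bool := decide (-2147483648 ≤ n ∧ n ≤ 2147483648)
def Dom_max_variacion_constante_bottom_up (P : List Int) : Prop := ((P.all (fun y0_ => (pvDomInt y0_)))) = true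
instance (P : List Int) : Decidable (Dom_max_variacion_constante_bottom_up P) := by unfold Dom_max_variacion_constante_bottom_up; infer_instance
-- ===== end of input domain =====

-- B replaces A's O(n^2) bottom-up table (inner rescan per start index) by a single
-- forward O(n) pass tracking the current equal-difference run length and the maximum.


-- ===== PORT A =====
-- inner 'for j in range(k+2, m): … else: break' loop of A
def innerA (P : List Int) (diferencia : Int) (m : Nat) (j : Nat) (len : Int) : Int :=
  if _h : j < m then
    if P.getD j 0 - P.getD (j - 1) 0 = diferencia then
      innerA P diferencia m (j + 1) (len + 1)
    else len
  else len
  termination_by m - j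

-- outer 'for k in range(m-2, -1, -1)' loop of A; counter c means k = c - 1 is next
def loopA (P : List Int) (m : Nat) : Nat → List Int → List Int
  | 0, M => M
  | k + 1, M =>
      let diferencia := P.getD (k + 1) 0 - P.getD k 0
      let longitud := innerA P diferencia m (k + 2) 2
      loopA P m k (M.set k (max longitud (M.getD (k + 1) 0)))

def max_variacion_constante_bottom_up (P : List Int) : Int :=
  let m := P.length
  if m < 2 then (m : Int)
  else
    let M0 := (List.replicate (m + 1) (0 : Int)).set (m - 1) 1
    (loopA P m (m - 1) M0).getD 0 0

-- ===== PORT B =====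
-- single forward pass: j runs over range(2, m)
def loopB (P : List Int) (m : Nat) (j : Nat) (best cur diff : Int) : Int :=
  if _h : j < m then
    let d := P.getD j 0 - P.getD (j - 1) 0
    let cur' := if d = diff then cur + 1 else 2
    let diff' := if d = diff then diff else d
    let best' := if cur' > best then cur' else best
    loopB P m (j + 1) best' cur' diff'
  else best
  termination_by m - j

def max_variacion_constante_bottom_up_alt (P : List Int) : Int :=
  let m := P.length
  if m < 2 then (m : Int)
  else loopB P m 2 2 2 (P.getD 1 0 - P.getD 0 0)

-- ===== PRECONDITION & SPEC =====
def Spec_max_variacion_constante_bottom_up (P : List Int) (out : Int) : Prop := out = max_variacion_constante_bottom_up_alt P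
instance (P : List Int) (out : Int) : Decidable (Spec_max_variacion_constante_bottom_up P out) := by unfold Spec_max_variacion_constante_bottom_up; infer_instance

-- ===== CLAIM (what is proved, stated in full; the proofs are below) =====
def Claim_equal_max_variacion_constante_bottom_up : Prop := ∀ (P : List Int), Dom_max_variacion_constante_bottom_up P → Spec_max_variacion_constante_bottom_up P (max_variacion_constante_bottom_up P)

-- ===== LEMMAS AND PROOFS =====

-- the list of consecutive differences: Df[i] = P[i+1] - P[i]
def Df (P : List Int) : List Int := List.zipWith (· - ·) P.tail P

-- length of the constant prefix run equal to d
def twN (d : Int) (ds : List Int) : Nat := (ds.takeWhile (· == d)).length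

-- 1 + length of longest constant prefix
def prD : List Int → Int
  | [] => 0
  | d :: ds => 1 + (twN d ds : Int) + 0

-- max over all suffixes of prD
def gD : List Int → Int
  | [] => 0
  | d :: ds => max (prD (d :: ds)) (gD ds)

-- forward-scan helper: value of the scan given current run length c ending with diff
def hD (c diff : Int) : List Int → Int
  | [] => c
  | d :: ds => if d = diff then hD (c + 1) diff ds else max c (hD 2 d ds)

lemma Df_length (P : List Int) : (Df P).length = P.length - 1 := by
  simp [Df]

lemma Df_getD (P : List Int) (i : Nat) (h : i < P.length - 1) :
    (Df P).getD i 0 = P.getD (i + 1) 0 - P.getD i 0 := by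
  have hl : (Df P).length = P.length - 1 := Df_length P
  have hi : i < (Df P).length := by omega
  have h1 : i + 1 < P.length := by omega
  have h0 : i < P.length := by omega
  rw [List.getD_eq_getElem _ _ hi, List.getD_eq_getElem _ _ h1, List.getD_eq_getElem _ _ h0]
  simp [Df, List.getElem_zipWith, List.getElem_tail]

lemma drop_Df_cons (P : List Int) (i : Nat) (h : i < P.length - 1) :
    (Df P).drop i = (Df P).getD i 0 :: (Df P).drop (i + 1) := by
  have hi : i < (Df P).length := by rw [Df_length]; omega
  rw [List.getD_eq_getElem _ _ hi]
  exact List.drop_eq_getElem_cons hi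

lemma drop_Df_nil (P : List Int) (i : Nat) (h : P.length - 1 ≤ i) :
    (Df P).drop i = [] := by
  apply List.drop_eq_nil_of_le
  rw [Df_length]; omega

lemma hD_ge (c diff : Int) (ds : List Int) : c ≤ hD c diff ds := by
  induction ds generalizing c diff with
  | nil => simp [hD]
  | cons d ds ih =>
      simp only [hD]
      split
      · have := ih (c + 1) diff; omega
      · have := le_max_left c (hD 2 d ds); omega

-- innerA counts exactly the constant prefix run of Df from index j-1
lemma innerA_eq (P : List Int) (diff : Int) (j : Nat) (len : Int) (hj : 1 ≤ j) :
    innerA P diff P.length j len = len + (twN diff ((Df P).drop (j - 1)) : Int) := by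
  generalize hfuel : P.length - j = fuel
  induction fuel generalizing j len with
  | zero =>
      rw [innerA]
      have hnil : (Df P).drop (j - 1) = [] := drop_Df_nil P (j - 1) (by omega)
      rw [hnil]
      have : ¬ j < P.length := by omega
      simp [this, twN]
  | succ n ih =>
      rw [innerA]
      have hj' : j < P.length := by omega
      have hcons := drop_Df_cons P (j - 1) (by omega)
      have hget := Df_getD P (j - 1) (by omega)
      have hj1 : j - 1 + 1 = j := by omega
      rw [hj1] at hcons hget
      simp only [hj', dif_pos]
      by_cases hd : P.getD j 0 - P.getD (j - 1) 0 = diff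
      · rw [if_pos hd]
        have hih := ih (j + 1) (len + 1) (by omega) (by omega)
        have hj2 : j + 1 - 1 = j := by omega
        rw [hj2] at hih
        have hd' : (Df P).getD (j - 1) 0 = diff := by rw [hget]; exact hd
        have hb : (((Df P).getD (j - 1) 0) == diff) = true := beq_iff_eq.mpr hd'
        rw [hih, hcons]
        unfold twN
        rw [List.takeWhile_cons, hb, if_pos rfl]
        simp only [List.length_cons]
        push_cast
        omega
      · rw [if_neg hd]
        have hd' : ¬ (Df P).getD (j - 1) 0 = diff := by rw [hget]; exact hd
        have hb : (((Df P).getD (j - 1) 0) == diff) = false := beq_eq_false_iff_ne.mpr hd'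
        rw [hcons]
        unfold twN
        rw [List.takeWhile_cons, hb, if_neg (by simp)]
        simp

-- loopB equals max best (hD cur diff ·) on the remaining diffs
lemma loopB_eq (P : List Int) (j : Nat) (b c diff : Int) (hj : 1 ≤ j) (hcb : c ≤ b) :
    loopB P P.length j b c diff = max b (hD c diff ((Df P).drop (j - 1))) := by
  generalize hfuel : P.length - j = fuel
  induction fuel generalizing j b c diff with
  | zero =>
      rw [loopB]
      have hnil : (Df P).drop (j - 1) = [] := drop_Df_nil P (j - 1) (by omega)
      have : ¬ j < P.length := by omega
      simp [this, hnil, hD]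
      omega
  | succ n ih =>
      rw [loopB]
      have hj' : j < P.length := by omega
      have hcons := drop_Df_cons P (j - 1) (by omega)
      have hget := Df_getD P (j - 1) (by omega)
      have hj1 : j - 1 + 1 = j := by omega
      rw [hj1] at hcons hget
      simp only [hj', dif_pos]
      rw [hcons, hD, ← hget]
      by_cases hd' : (Df P).getD (j - 1) 0 = diff
      · simp only [if_pos hd']
        have hrec := ih (j + 1) (if c + 1 > b then c + 1 else b) (c + 1) diff (by omega)
          (by split <;> omega) (by omega)
        have hj2 : j + 1 - 1 = j := by omega
        rw [hj2] at hrec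
        rw [hrec]
        have hge := hD_ge (c + 1) diff ((Df P).drop j)
        split <;> omega
      · simp only [if_neg hd']
        have hrec := ih (j + 1) (if (2:Int) > b then 2 else b) 2 ((Df P).getD (j - 1) 0) (by omega)
          (by split <;> omega) (by omega)
        have hj2 : j + 1 - 1 = j := by omega
        rw [hj2] at hrec
        rw [hrec]
        have hge := hD_ge 2 ((Df P).getD (j - 1) 0) ((Df P).drop j)
        split <;> omega

-- dropping the leading constant run does not change the max when 2 + run is kept
lemma g_drop_run (ds : List Int) (e : Int) :
    max (2 + (twN e ds : Int)) (1 + gD ds)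
      = max (2 + (twN e ds : Int)) (1 + gD (ds.drop (twN e ds))) := by
  induction ds generalizing e with
  | nil => simp [twN]
  | cons x xs ih =>
      by_cases hx : x = e
      · subst hx
        have htw : twN x (x :: xs) = 1 + twN x xs := by
          simp [twN]; omega
        rw [htw]
        have hdrop : (x :: xs).drop (1 + twN x xs) = xs.drop (twN x xs) := by
          simp [List.drop_succ_cons, Nat.add_comm]
        rw [hdrop]
        have hg : gD (x :: xs) = max (1 + (twN x xs : Int)) (gD xs) := by
          simp [gD, prD]
        rw [hg]
        have := ih x
        push_cast
        omega
      · have htw : twN e (x :: xs) = 0 := by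
          simp [twN, beq_eq_false_iff_ne.mpr hx]
        rw [htw]
        simp

-- the forward-scan helper equals the suffix-max formulation
lemma hD_eq (ds : List Int) (c d : Int) (hc : 1 ≤ c) :
    hD c d ds = max (c + (twN d ds : Int)) (1 + gD (ds.drop (twN d ds))) := by
  induction ds generalizing c d with
  | nil => simp [hD, twN, gD]; omega
  | cons x xs ih =>
      by_cases hx : x = d
      · subst hx
        have htw : twN x (x :: xs) = 1 + twN x xs := by
          simp [twN]; omega
        rw [hD, if_pos rfl, htw]
        have hdrop : (x :: xs).drop (1 + twN x xs) = xs.drop (twN x xs) := by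
          simp [List.drop_succ_cons, Nat.add_comm]
        rw [hdrop, ih (c + 1) x (by omega)]
        push_cast
        omega
      · have htw : twN d (x :: xs) = 0 := by
          simp [twN, beq_eq_false_iff_ne.mpr hx]
        rw [hD, if_neg hx, htw]
        rw [ih 2 x (by omega)]
        have hg : gD (x :: xs) = max (1 + (twN x xs : Int)) (gD xs) := by
          simp [gD, prD]
        have := g_drop_run xs x
        simp only [List.drop_zero, hg]
        omega

-- loopA invariant: M[c] already holds 1 + gD (drop c), and the final M[0] is 1 + gD (Df P)
lemma loopA_inv (P : List Int) (c : Nat) (M : List Int)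
    (hc : c ≤ P.length - 1) (hlen : M.length = P.length + 1)
    (hM : M.getD c 0 = 1 + gD ((Df P).drop c)) :
    (loopA P P.length c M).getD 0 0 = 1 + gD (Df P) := by
  induction c generalizing M with
  | zero => rw [loopA]; simpa using hM
  | succ k ih =>
      rw [loopA]
      refine ih _ (by omega) (by simp [hlen]) ?_
      have hget := Df_getD P k (by omega)
      have hcons := drop_Df_cons P k (by omega)
      have hinner := innerA_eq P (P.getD (k + 1) 0 - P.getD k 0) (k + 2) 2 (by omega)
      have hj : k + 2 - 1 = k + 1 := by omega
      rw [hj] at hinner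
      have hsetget : (M.set k (max (innerA P (P.getD (k + 1) 0 - P.getD k 0) P.length (k + 2) 2) (M.getD (k + 1) 0))).getD k 0
          = max (innerA P (P.getD (k + 1) 0 - P.getD k 0) P.length (k + 2) 2) (M.getD (k + 1) 0) := by
        have hk : k < M.length := by omega
        rw [List.getD_eq_getElem _ _ (by simpa using hk)]
        simp [List.getElem_set_self]
      rw [hsetget, hinner, hM, hcons]
      have hgd : gD ((Df P).getD k 0 :: (Df P).drop (k + 1))
          = max (1 + (twN ((Df P).getD k 0) ((Df P).drop (k + 1)) : Int)) (gD ((Df P).drop (k + 1))) := by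
        simp [gD, prD]
      rw [hgd, ← hget]
      omega

lemma A_eq (P : List Int) (h2 : 2 ≤ P.length) :
    max_variacion_constante_bottom_up P = 1 + gD (Df P) := by
  unfold max_variacion_constante_bottom_up
  have hnl : ¬ P.length < 2 := by omega
  simp only [hnl, if_false]
  apply loopA_inv P (P.length - 1) _ (by omega) (by simp)
  have hdrop : (Df P).drop (P.length - 1) = [] := drop_Df_nil P _ (by omega)
  rw [hdrop]
  have hlt : P.length - 1 < ((List.replicate (P.length + 1) (0:Int)).set (P.length - 1) 1).length := by
    simp
  rw [List.getD_eq_getElem _ _ hlt]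
  rw [List.getElem_set_self (by simp)]
  simp [gD]

lemma B_eq (P : List Int) (h2 : 2 ≤ P.length) :
    max_variacion_constante_bottom_up_alt P = 1 + gD (Df P) := by
  unfold max_variacion_constante_bottom_up_alt
  have hnl : ¬ P.length < 2 := by omega
  simp only [hnl, if_false]
  have hB := loopB_eq P 2 2 2 (P.getD 1 0 - P.getD 0 0) (by omega) (by omega)
  have hget := Df_getD P 0 (by omega)
  have hcons := drop_Df_cons P 0 (by omega)
  simp only [List.drop_zero] at hcons
  rw [hB]
  have h21 : (2:Nat) - 1 = 1 := rfl
  rw [h21, ← hget]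
  set d0 := (Df P).getD 0 0
  set ds := (Df P).drop 1
  have hge := hD_ge 2 d0 ds
  have heq := hD_eq ds 2 d0 (by omega)
  have hgd : gD (Df P) = max (1 + (twN d0 ds : Int)) (gD ds) := by
    rw [hcons]; simp [gD, prD]
  have hrun := g_drop_run ds d0
  rw [heq, hgd]
  omega

-- ===== VERDICT (by name: the statement is the Claim_ definition above) =====
theorem max_variacion_constante_bottom_up_spec : Claim_equal_max_variacion_constante_bottom_up := by
  intro P _
  unfold Spec_max_variacion_constante_bottom_up
  by_cases h2 : 2 ≤ P.length
  · rw [A_eq P h2, B_eq P h2]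
  · unfold max_variacion_constante_bottom_up max_variacion_constante_bottom_up_alt
    have : P.length < 2 := by omega
    simp [this]
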